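-- pv_equiv track=rewrite | github.com/AlgorithmWithFriend/Day1 | LEVEL2/Day4/FunctionDevelop.py | solution
-- ===== SOURCE A (Python) =====
-- def solution(progresses, speeds):
--     answer = []
--
--     release_day = 0
--     finished_time = []
--     for progress, speed in zip(progresses, speeds):
--         release_day += 1
--         course_rate = progress + speed * release_day
--         while course_rate < 100:
--             release_day += 1
--             course_rate = progress + speed * release_day
--         finished_time.append(release_day)
--         release_day = 0
--
--     front = 0
--     for index in range(len(finished_time)):
--         if finished_time[front] < finished_time[index]:
--             answer.append(index - front)
--             front = index
--     answer.append(len(finished_time) - front)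
--     return answer
-- ===== SOURCE B (Python) =====
-- def solution(progresses, speeds):
--     # closed-form finish day per task, then one grouping pass (requires positive speeds)
--     days = [max(1, -((p - 100) // s)) for p, s in zip(progresses, speeds)]
--     answer = []
--     count = 0
--     leader = 0
--     for d in days:
--         if count > 0 and d > leader:
--             answer.append(count)
--             count = 0
--         if count == 0:
--             leader = d
--         count += 1
--     answer.append(count)
--     return answer
-- ===== Notes on version B (the rewrite author's own statement) =====
-- stated objective: faster
-- what changed: B computes each finish day in closed form with ceiling division max(1, -((p-100)//s)) instead of A's day-by-day incremental while loop, and groups in a single pass carrying (count, leader) instead of indexing back into the finished list; intended as asymptotically faster (O(n) vs O(n*maxDays)) — a timing run could not measure a ratio because A already timed out at n=16 where B returned.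
-- outside the precondition, e.g. on solution([100], [0]): A returns [1], B raises ZeroDivisionError; on solution([150, 97], [-10, 1]): A returns [1, 1], B returns [2]
import Mathlib
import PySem

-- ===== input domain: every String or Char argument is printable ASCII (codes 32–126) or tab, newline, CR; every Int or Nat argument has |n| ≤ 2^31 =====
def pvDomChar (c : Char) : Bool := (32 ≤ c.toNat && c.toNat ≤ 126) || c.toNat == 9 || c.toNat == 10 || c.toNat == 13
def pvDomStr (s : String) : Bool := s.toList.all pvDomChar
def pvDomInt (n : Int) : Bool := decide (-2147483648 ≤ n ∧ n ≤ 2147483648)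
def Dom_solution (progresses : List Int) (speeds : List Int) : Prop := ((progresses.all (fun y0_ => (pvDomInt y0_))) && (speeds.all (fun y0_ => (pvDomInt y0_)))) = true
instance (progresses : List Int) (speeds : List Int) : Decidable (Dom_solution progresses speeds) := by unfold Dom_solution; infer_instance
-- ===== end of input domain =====

-- B replaces A's day-by-day while loop with a closed-form ceiling-division finish day and a
-- single (count, leader) grouping pass; intended as asymptotically faster (O(n) vs O(n*maxDays)):
-- a timing run measured no ratio because A timed out at n=16 where B returned.


-- ===== PORT A =====
-- A's inner `while course_rate < 100` loop; fuel only makes the recursion total,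
-- it is large enough to never be exhausted when the speed is positive (see Pre_).
def solWhile (p s : Int) : Nat → Int → Int
  | 0, day => day
  | f + 1, day => if p + s * day < 100 then solWhile p s f (day + 1) else day

def solution (progresses : List Int) (speeds : List Int) : List Int :=
  let finished_time :=
    (progresses.zip speeds).foldl
      (fun acc pr => acc ++ [solWhile pr.1 pr.2 ((100 - pr.1).toNat + 1) 1]) []
  let st :=
    (List.range finished_time.length).foldl
      (fun (st : List Int × Nat) index =>
        if finished_time.getD st.2 0 < finished_time.getD index 0 then
          (st.1 ++ [(index : Int) - (st.2 : Int)], index)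
        else st)
      ([], 0)
  st.1 ++ [(finished_time.length : Int) - (st.2 : Int)]

-- ===== PORT B =====
def groupStep (st : List Int × Int × Int) (d : Int) : List Int × Int × Int :=
  let ans := st.1
  let count := st.2.1
  let leader := st.2.2
  let ans' := if 0 < count ∧ leader < d then ans ++ [count] else ans
  let count' := if 0 < count ∧ leader < d then 0 else count
  let leader' := if count' = 0 then d else leader
  (ans', count' + 1, leader')

def solution_alt (progresses : List Int) (speeds : List Int) : List Int :=
  let days := (progresses.zip speeds).map
    (fun pr => max 1 (-(PySem.Int.floordiv (pr.1 - 100) pr.2)))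
  let st := days.foldl groupStep ([], 0, 0)
  st.1 ++ [st.2.1]

-- ===== PRECONDITION & SPEC =====
-- Pre_ restricts to positive speeds, the task's natural domain: for speed ≤ 0 A either loops
-- forever or (when progress+speed ≥ 100 already) returns a value B's ceiling division does not.
def Pre_solution (progresses : List Int) (speeds : List Int) : Prop :=
  ∀ pr ∈ progresses.zip speeds, 0 < pr.2
instance (progresses : List Int) (speeds : List Int) : Decidable (Pre_solution progresses speeds) := by unfold Pre_solution; infer_instance

def pvWitness_solution : List Int × List Int := ([93, 30, 55], [1, 30, 5])

def Spec_solution (progresses : List Int) (speeds : List Int) (out : List Int) : Prop := out = solution_alt progresses speeds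
instance (progresses : List Int) (speeds : List Int) (out : List Int) : Decidable (Spec_solution progresses speeds out) := by unfold Spec_solution; infer_instance

-- ===== CLAIM (what is proved, stated in full; the proofs are below) =====
def Claim_equal_solution : Prop := ∀ (progresses : List Int) (speeds : List Int), Dom_solution progresses speeds → Pre_solution progresses speeds → Spec_solution progresses speeds (solution progresses speeds)

-- ===== LEMMAS AND PROOFS =====

-- closed-form day
def dstar (p s : Int) : Int := max 1 (-(PySem.Int.floordiv (p - 100) s))

lemma dstar_char (p s d : Int) (hs : 0 < s) :
    -(PySem.Int.floordiv (p - 100) s) ≤ d ↔ 100 - p ≤ s * d := by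
  rw [neg_le, PySem.Int.le_floordiv_iff_mul_le hs]
  constructor <;> intro h <;> nlinarith [h]

lemma lt_dstar_iff (p s day : Int) (hs : 0 < s) (hday : 1 ≤ day) :
    p + s * day < 100 ↔ day < dstar p s := by
  unfold dstar
  rcases le_or_gt (-(PySem.Int.floordiv (p - 100) s)) 1 with h | h
  · rw [max_eq_left h]
    have := (dstar_char p s day hs).mp (le_trans h hday)
    constructor <;> intro h2 <;> omega
  · rw [max_eq_right (le_of_lt h)]
    constructor
    · intro h2
      by_contra hc
      have := (dstar_char p s day hs).mp (by omega)
      omega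
    · intro h2
      by_contra hc
      have := (dstar_char p s day hs).mpr (by omega)
      omega

lemma solWhile_eq (p s : Int) (hs : 0 < s) :
    ∀ (fuel : Nat) (day : Int), 1 ≤ day → day ≤ dstar p s →
      dstar p s - day < (fuel : Int) → solWhile p s fuel day = dstar p s := by
  intro fuel
  induction fuel with
  | zero => intro day _ _ hf; simp at hf; omega
  | succ f ih =>
      intro day h1 h2 hf
      rw [solWhile]
      by_cases hc : p + s * day < 100
      · have hlt := (lt_dstar_iff p s day hs h1).mp hc
        rw [if_pos hc]
        exact ih (day + 1) (by omega) (by omega) (by push_cast at hf ⊢; omega)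
      · have : ¬ day < dstar p s := fun h => hc ((lt_dstar_iff p s day hs h1).mpr h)
        rw [if_neg hc]; omega

lemma dstar_le_fuel (p s : Int) (hs : 0 < s) : dstar p s ≤ ((100 - p).toNat : Int) + 1 := by
  unfold dstar
  rcases le_or_gt (-(PySem.Int.floordiv (p - 100) s)) 1 with h | h
  · simp [max_eq_left h]
  · rw [max_eq_right (le_of_lt h)]
    have h0 : ¬ ((100 : Int) - p ≤ s * 0) := by
      intro hx
      have := (dstar_char p s 0 hs).mpr hx
      omega
    have hp : (1 : Int) ≤ 100 - p := by omega
    have := (dstar_char p s (100 - p) hs).mpr (by nlinarith)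
    omega

lemma finishDay_eq (p s : Int) (hs : 0 < s) :
    solWhile p s ((100 - p).toNat + 1) 1 = dstar p s := by
  have h1 : (1 : Int) ≤ dstar p s := le_max_left _ _
  exact solWhile_eq p s hs _ 1 le_rfl h1
    (by have := dstar_le_fuel p s hs; push_cast; omega)

-- A's append-fold builds a map
lemma foldl_append_map {α β : Type} (f : α → β) :
    ∀ (l : List α) (a : List β), l.foldl (fun acc x => acc ++ [f x]) a = a ++ l.map f := by
  intro l
  induction l with
  | nil => simp
  | cons x xs ih => intro a; simp [List.foldl, ih, List.append_assoc]

-- the grouping states of the two second loops, and their correspondence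
def stA (ft : List Int) (k : Nat) : List Int × Nat :=
  (List.range k).foldl
    (fun (st : List Int × Nat) index =>
      if ft.getD st.2 0 < ft.getD index 0 then
        (st.1 ++ [(index : Int) - (st.2 : Int)], index)
      else st)
    ([], 0)

lemma take_succ_getD (ft : List Int) (k : Nat) (hk : k < ft.length) :
    ft.take (k + 1) = ft.take k ++ [ft.getD k 0] := by
  rw [List.take_add_one]
  simp [List.getD, List.getElem?_eq_getElem hk]

lemma group_invariant (ft : List Int) :
    ∀ k, 1 ≤ k → k ≤ ft.length →
      (stA ft k).2 < k ∧
      ((ft.take k).foldl groupStep ([], 0, 0)).1 = (stA ft k).1 ∧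
      ((ft.take k).foldl groupStep ([], 0, 0)).2.1 = (k : Int) - ((stA ft k).2 : Int) ∧
      ((ft.take k).foldl groupStep ([], 0, 0)).2.2 = ft.getD (stA ft k).2 0 := by
  intro k
  induction k with
  | zero => intro h; omega
  | succ k ih =>
      intro _ hk
      rcases Nat.eq_zero_or_pos k with rfl | hk1
      · -- k+1 = 1 : one element processed
        have hlen : 0 < ft.length := hk
        have ht : ft.take 1 = [ft.getD 0 0] := by
          have := take_succ_getD ft 0 hlen; simpa using this
        simp [stA, List.range_succ, ht, groupStep]
      · obtain ⟨hfront, hans, hcount, hleader⟩ := ih hk1 (by omega)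
        have hklen : k < ft.length := hk
        have hstep : stA ft (k + 1) =
            (if ft.getD (stA ft k).2 0 < ft.getD k 0 then
              ((stA ft k).1 ++ [(k : Int) - ((stA ft k).2 : Int)], k)
            else stA ft k) := by
          unfold stA
          rw [List.range_succ, List.foldl_append]
          rfl
        have htake := take_succ_getD ft k hklen
        rw [htake, List.foldl_append]
        set B := (ft.take k).foldl groupStep ([], 0, 0) with hB
        rw [hstep]
        by_cases hc : ft.getD (stA ft k).2 0 < ft.getD k 0
        · have hcond : 0 < B.2.1 ∧ B.2.2 < ft.getD k 0 := by
            refine ⟨?_, by rw [hleader]; exact hc⟩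
            rw [hcount]; omega
          simp only [if_pos hc, List.foldl_cons, List.foldl_nil, groupStep,
            if_pos hcond]
          refine ⟨by omega, by rw [hans, hcount], by simp, by simp⟩
        · have hcond : ¬ (0 < B.2.1 ∧ B.2.2 < ft.getD k 0) := by
            rw [hleader]; tauto
          simp only [if_neg hc, List.foldl_cons, List.foldl_nil, groupStep,
            if_neg hcond]
          have hne : ¬ (B.2.1 = 0) := by rw [hcount]; omega
          simp only [if_neg hne]
          refine ⟨by omega, hans, by rw [hcount]; push_cast; ring, hleader⟩

-- full grouping equality for any finished-time list
lemma grouping_eq (ft : List Int) :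
    (stA ft ft.length).1 ++ [(ft.length : Int) - ((stA ft ft.length).2 : Int)] =
      (ft.foldl groupStep ([], 0, 0)).1 ++ [(ft.foldl groupStep ([], 0, 0)).2.1] := by
  rcases Nat.eq_zero_or_pos ft.length with h0 | hpos
  · have : ft = [] := List.eq_nil_of_length_eq_zero h0
    subst this; simp [stA]
  · obtain ⟨_, hans, hcount, _⟩ := group_invariant ft ft.length hpos le_rfl
    simp only [List.take_length] at hans hcount
    rw [hans, hcount]

-- ===== VERDICT (by name: the statement is the Claim_ definition above) =====
theorem solution_spec : Claim_equal_solution := by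
  intro progresses speeds _ hpre
  unfold Spec_solution solution solution_alt
  have hdays :
      (progresses.zip speeds).foldl
        (fun acc pr => acc ++ [solWhile pr.1 pr.2 ((100 - pr.1).toNat + 1) 1]) [] =
      (progresses.zip speeds).map
        (fun pr => max 1 (-(PySem.Int.floordiv (pr.1 - 100) pr.2))) := by
    rw [foldl_append_map]
    simp only [List.nil_append]
    apply List.map_congr_left
    intro pr hpr
    exact finishDay_eq pr.1 pr.2 (hpre pr hpr)
  rw [hdays]
  exact grouping_eq _
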